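-- pv_equiv track=rewrite | github.com/diegomezg/python-practices | Practicas/p4/p4.py | last_upper
-- ===== SOURCE A (Python) =====
-- def last_upper(text):
--     reverse = text[::-1]
--     words = reverse.split()
--     title = []
--     for i in words:
--         title.append(i.title())
--     result = ' '.join(title)
--     final = result[::-1]
--     return final
-- ===== SOURCE B (Python) =====
-- def last_upper(text):
--     # Forward lookahead state machine: a letter is uppercased iff the following
--     # character in the word is not a letter (run-final), otherwise lowercased;
--     # no reversal and no title() anywhere.
--     out = []
--     for w in text.split():
--         buf = []
--         n = len(w)
--         for i in range(n):
--             c = w[i]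
--             if c.isalpha():
--                 nxt_alpha = i + 1 < n and w[i + 1].isalpha()
--                 buf.append(c.lower() if nxt_alpha else c.upper())
--             else:
--                 buf.append(c)
--         out.append(''.join(buf))
--     return ' '.join(out)
-- ===== Notes on version B (the rewrite author's own statement) =====
-- stated objective: alternative
-- what changed: B drops both reversals and title() entirely: it scans each word forward with a one-character lookahead, uppercasing a letter exactly when the next character is not a letter (run-final) and lowercasing other letters.
import Mathlib
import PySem

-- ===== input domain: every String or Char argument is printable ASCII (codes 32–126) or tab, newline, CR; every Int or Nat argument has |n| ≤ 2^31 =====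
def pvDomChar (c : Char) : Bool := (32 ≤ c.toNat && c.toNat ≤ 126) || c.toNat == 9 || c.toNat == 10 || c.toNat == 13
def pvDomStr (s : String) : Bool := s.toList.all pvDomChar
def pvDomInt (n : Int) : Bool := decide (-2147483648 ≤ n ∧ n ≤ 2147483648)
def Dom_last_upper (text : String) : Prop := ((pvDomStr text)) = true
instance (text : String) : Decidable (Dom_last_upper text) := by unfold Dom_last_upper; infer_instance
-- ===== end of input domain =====

-- B replaces the reverse/title/reverse pipeline by a forward lookahead scan of each word.

-- Hand port of Python's str.title() (PySem has no title); exact on the ASCII domain: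
-- a letter is uppercased when the previous character was not a letter, lowercased otherwise;
-- non-letters pass through and reset the state. Only A's port uses it.
def pyTitleGo : Bool → List Char → List Char
  | _, [] => []
  | prev, c :: t =>
    if PySem.Chars.isalpha c then
      (if prev then PySem.Chars.lowerChar c else PySem.Chars.upperChar c) :: pyTitleGo true t
    else c :: pyTitleGo false t

def pyTitle (w : List Char) : List Char := pyTitleGo false w

-- ===== PORT A =====
-- text[::-1] is List.reverse (PySem.Chars.slice?_none_none_neg_one).
def last_upper (text : String) : String :=
  let reverse := text.toList.reverse
  let words := PySem.Chars.split₀ reverse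
  let title := words.foldl (fun acc i => acc ++ [pyTitle i]) []
  let result := PySem.Chars.join [' '] title
  let final := result.reverse
  String.ofList final

-- ===== PORT B =====
-- per-word forward scan with one-character lookahead: a letter is uppercased iff the
-- next character is not a letter; non-letters pass through.
def lastUpWord : List Char → List Char
  | [] => []
  | [c] => if PySem.Chars.isalpha c then [PySem.Chars.upperChar c] else [c]
  | c :: d :: t =>
    (if PySem.Chars.isalpha c then
       (if PySem.Chars.isalpha d then PySem.Chars.lowerChar c else PySem.Chars.upperChar c)
     else c) :: lastUpWord (d :: t)

def last_upper_alt (text : String) : String :=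
  String.ofList (PySem.Chars.join [' ']
    ((PySem.Chars.split₀ text.toList).map lastUpWord))

-- ===== PRECONDITION & SPEC =====
def Spec_last_upper (text : String) (out : String) : Prop := out = last_upper_alt text
instance (text : String) (out : String) : Decidable (Spec_last_upper text out) := by unfold Spec_last_upper; infer_instance

-- ===== CLAIM (what is proved, stated in full; the proofs are below) =====
def Claim_equal_last_upper : Prop := ∀ (text : String), Dom_last_upper text → Spec_last_upper text (last_upper text)

-- ===== LEMMAS AND PROOFS =====

-- A simple structural whitespace splitter; proved equal to PySem.Chars.split₀ below.
def tokens : List Char → List (List Char)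
  | [] => []
  | c :: rest =>
    if PySem.Chars.isspace c then tokens rest
    else (c :: rest.takeWhile (fun d => !PySem.Chars.isspace d)) ::
         tokens (rest.dropWhile (fun d => !PySem.Chars.isspace d))
termination_by s => s.length
decreasing_by
  · simp
  · have := List.length_dropWhile_le (fun d => !PySem.Chars.isspace d) rest
    simp; omega

lemma tokens_nil : tokens [] = [] := by simp [tokens]

lemma tokens_cons_space (c : Char) (rest : List Char) (hc : PySem.Chars.isspace c = true) :
    tokens (c :: rest) = tokens rest := by rw [tokens, if_pos hc]

lemma tokens_cons_nonspace (c : Char) (rest : List Char) (hc : PySem.Chars.isspace c = false) :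
    tokens (c :: rest) = (c :: rest.takeWhile (fun d => !PySem.Chars.isspace d)) ::
         tokens (rest.dropWhile (fun d => !PySem.Chars.isspace d)) := by
  rw [tokens, if_neg (by simp [hc])]

lemma tokens_all_nonspace (w : List Char) (hne : w ≠ [])
    (h : ∀ c ∈ w, PySem.Chars.isspace c = false) : tokens w = [w] := by
  cases w with
  | nil => simp at hne
  | cons c t =>
    rw [tokens_cons_nonspace c t (h c (by simp))]
    have ht : t.takeWhile (fun d => !PySem.Chars.isspace d) = t :=
      List.takeWhile_eq_self_iff.mpr (fun d hd => by simp [h d (by simp [hd])])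
    have hd : t.dropWhile (fun d => !PySem.Chars.isspace d) = [] :=
      List.dropWhile_eq_nil_iff.mpr (fun d hd => by simp [h d (by simp [hd])])
    rw [ht, hd, tokens_nil]

-- splitting at a boundary whose right side is empty or starts with a space
lemma tokens_append (ys zs : List Char)
    (hz : zs = [] ∨ ∃ h t, zs = h :: t ∧ PySem.Chars.isspace h = true) :
    tokens (ys ++ zs) = tokens ys ++ tokens zs := by
  induction ys using tokens.induct with
  | case1 =>
    rcases hz with rfl | ⟨h, t, rfl, hh⟩
    · simp [tokens_nil]
    · simp [tokens_nil]
  | case2 c rest hc ih =>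
    rw [List.cons_append, tokens_cons_space c _ hc, tokens_cons_space c _ hc, ih]
  | case3 c rest hc ih =>
    have hc' : PySem.Chars.isspace c = false := by
      revert hc; cases PySem.Chars.isspace c <;> simp
    rw [List.cons_append, tokens_cons_nonspace c _ hc', tokens_cons_nonspace c _ hc']
    have hzt : zs.takeWhile (fun d => !PySem.Chars.isspace d) = [] := by
      rcases hz with rfl | ⟨h, t, rfl, hh⟩
      · rfl
      · simp [hh]
    have hzd : zs.dropWhile (fun d => !PySem.Chars.isspace d) = zs := by
      rcases hz with rfl | ⟨h, t, rfl, hh⟩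
      · rfl
      · simp [hh]
    by_cases hall : ∀ d ∈ rest, (fun d => !PySem.Chars.isspace d) d = true
    · have htw : rest.takeWhile (fun d => !PySem.Chars.isspace d) = rest :=
        List.takeWhile_eq_self_iff.mpr hall
      have hdw : rest.dropWhile (fun d => !PySem.Chars.isspace d) = [] :=
        List.dropWhile_eq_nil_iff.mpr hall
      rw [List.takeWhile_append, List.dropWhile_append]
      simp [htw, hdw, hzt, hzd, tokens_nil]
    · have htw : (rest.takeWhile (fun d => !PySem.Chars.isspace d)).length ≠ rest.length := by
        intro hlen
        exact hall (List.takeWhile_eq_self_iff.mp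
          ((List.takeWhile_prefix _).eq_of_length hlen))
      have hdw : (rest.dropWhile (fun d => !PySem.Chars.isspace d)) ≠ [] := by
        intro hnil
        exact hall (List.dropWhile_eq_nil_iff.mp hnil)
      rw [List.takeWhile_append, List.dropWhile_append, if_neg htw,
        if_neg (by simpa using hdw), ih]
      simp

-- splitting at a boundary whose left side is empty or ends with a space
lemma tokens_append' (ys zs : List Char)
    (hy : ys = [] ∨ ∃ ys' sp, ys = ys' ++ [sp] ∧ PySem.Chars.isspace sp = true) :
    tokens (ys ++ zs) = tokens ys ++ tokens zs := by
  rcases hy with rfl | ⟨ys', sp, rfl, hsp⟩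
  · simp [tokens_nil]
  · rw [List.append_assoc, List.singleton_append,
      tokens_append ys' (sp :: zs) (Or.inr ⟨sp, zs, rfl, hsp⟩),
      tokens_append ys' [sp] (Or.inr ⟨sp, [], rfl, hsp⟩),
      tokens_cons_space sp zs hsp, tokens_cons_space sp [] hsp, tokens_nil]
    simp

-- reversing the text reverses the token list and each token
lemma tokens_reverse (s : List Char) :
    tokens s.reverse = ((tokens s).map List.reverse).reverse := by
  induction s using tokens.induct with
  | case1 => simp [tokens_nil]
  | case2 c rest hc ih =>
    rw [List.reverse_cons,
      tokens_append rest.reverse [c] (Or.inr ⟨c, [], rfl, hc⟩),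
      tokens_cons_space c [] hc, tokens_nil, List.append_nil, ih,
      tokens_cons_space c rest hc]
  | case3 c rest hc ih =>
    have hc' : PySem.Chars.isspace c = false := by
      revert hc; cases PySem.Chars.isspace c <;> simp
    have hsplit : rest = rest.takeWhile (fun d => !PySem.Chars.isspace d) ++
        rest.dropWhile (fun d => !PySem.Chars.isspace d) :=
      (List.takeWhile_append_dropWhile).symm
    have hrev : (c :: rest).reverse =
        (rest.dropWhile (fun d => !PySem.Chars.isspace d)).reverse ++
        ((rest.takeWhile (fun d => !PySem.Chars.isspace d)).reverse ++ [c]) := by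
      conv_lhs => rw [hsplit]
      simp only [List.reverse_cons, List.reverse_append, List.append_assoc]
    have hbound : (rest.dropWhile (fun d => !PySem.Chars.isspace d)).reverse = [] ∨
        ∃ ys' sp, (rest.dropWhile (fun d => !PySem.Chars.isspace d)).reverse = ys' ++ [sp] ∧
        PySem.Chars.isspace sp = true := by
      cases hdwv : rest.dropWhile (fun d => !PySem.Chars.isspace d) with
      | nil => exact Or.inl (by simp)
      | cons h t =>
        refine Or.inr ⟨t.reverse, h, by simp, ?_⟩
        have := List.head_dropWhile_not (fun d => !PySem.Chars.isspace d) (l := rest)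
          (by simp [hdwv])
        simpa [hdwv] using this
    have hword : tokens ((rest.takeWhile (fun d => !PySem.Chars.isspace d)).reverse ++ [c])
        = [(rest.takeWhile (fun d => !PySem.Chars.isspace d)).reverse ++ [c]] := by
      apply tokens_all_nonspace _ (by simp)
      intro d hd
      rcases List.mem_append.mp hd with hd | hd
      · have := List.mem_takeWhile_imp (List.mem_reverse.mp hd)
        simpa using this
      · simp at hd; subst hd; exact hc'
    rw [hrev, tokens_append' _ _ hbound, hword, ih, tokens_cons_nonspace c rest hc']
    simp

-- the accumulator loop of PySem.Chars.split₀ computes tokens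
lemma split0_go_tokens (s : List Char) : ∀ (cur : List Char) (acc : List (List Char)),
    (∀ c ∈ cur, PySem.Chars.isspace c = false) →
    PySem.Chars.split₀.go s cur acc = acc.reverse ++ tokens (cur.reverse ++ s) := by
  induction s with
  | nil =>
    intro cur acc hinv
    match cur with
    | [] => simp [PySem.Chars.split₀.go, tokens_nil]
    | c :: t =>
      rw [PySem.Chars.split₀.go, List.append_nil,
        tokens_all_nonspace _ (by simp) (fun d hd => hinv d (List.mem_reverse.mp hd))]
      simp
  | cons c rest ih =>
    intro cur acc hinv
    rw [PySem.Chars.split₀.go]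
    by_cases hc : PySem.Chars.isspace c = true
    · rw [if_pos hc]
      match cur with
      | [] =>
        have hemp : ([] : List Char).isEmpty = true := rfl
        rw [if_pos hemp, ih [] acc (by simp)]
        simp [tokens_cons_space c rest hc]
      | w :: t =>
        rw [if_neg (by simp), ih [] ((w :: t).reverse :: acc) (by simp)]
        have hword : tokens ((w :: t).reverse) = [(w :: t).reverse] :=
          tokens_all_nonspace _ (by simp) (fun d hd => hinv d (List.mem_reverse.mp hd))
        rw [tokens_append ((w :: t).reverse) (c :: rest) (Or.inr ⟨c, rest, rfl, hc⟩),
          hword, tokens_cons_space c rest hc]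
        simp
    · rw [if_neg hc, ih (c :: cur) acc]
      · simp
      · intro d hd
        rcases List.mem_cons.mp hd with rfl | hd
        · revert hc; cases PySem.Chars.isspace d <;> simp
        · exact hinv d hd

lemma split0_eq_tokens (s : List Char) : PySem.Chars.split₀ s = tokens s := by
  have := split0_go_tokens s [] []
  simpa [PySem.Chars.split₀] using this (by simp)

-- join on a list split at a non-trivial point
lemma join_append (sep : List Char) (xs ys : List (List Char)) (hx : xs ≠ []) (hy : ys ≠ []) :
    PySem.Chars.join sep (xs ++ ys) = PySem.Chars.join sep xs ++ sep ++ PySem.Chars.join sep ys := by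
  induction xs with
  | nil => simp at hx
  | cons a t ih =>
    match t with
    | [] =>
      match ys with
      | [] => simp at hy
      | b :: u => simp [PySem.Chars.join_singleton, PySem.Chars.join_cons_cons]
    | a' :: t' =>
      simp only [List.cons_append] at ih
      rw [List.cons_append, List.cons_append, PySem.Chars.join_cons_cons,
        PySem.Chars.join_cons_cons, ih (by simp)]
      simp

-- join with the single-char separator ' ' commutes with global reversal
lemma join_reverse (L : List (List Char)) :
    (PySem.Chars.join [' '] L).reverse
      = PySem.Chars.join [' '] ((L.map List.reverse).reverse) := by
  induction L with
  | nil => simp [PySem.Chars.join_nil]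
  | cons a t ih =>
    match t with
    | [] => simp [PySem.Chars.join_singleton]
    | b :: u =>
      rw [PySem.Chars.join_cons_cons, List.map_cons, List.reverse_cons,
        join_append [' '] (((b :: u).map List.reverse).reverse) [a.reverse]
          (by simp) (by simp),
        PySem.Chars.join_singleton, ← ih]
      simp

-- one title step; the Bool is 'the previous character was a letter'
def titleStep (prev : Bool) (c : Char) : Char :=
  if PySem.Chars.isalpha c then
    (if prev then PySem.Chars.lowerChar c else PySem.Chars.upperChar c)
  else c

lemma pyTitleGo_snoc (b : Bool) (v : List Char) (c : Char) :
    pyTitleGo b (v ++ [c]) =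
      pyTitleGo b v ++ [titleStep ((v.getLast?.map PySem.Chars.isalpha).getD b) c] := by
  induction v generalizing b with
  | nil => simp only [List.nil_append, pyTitleGo, titleStep]; split_ifs <;> simp_all
  | cons d t ih =>
    rw [List.cons_append, pyTitleGo, pyTitleGo]
    by_cases hd : PySem.Chars.isalpha d = true
    · rw [if_pos hd, if_pos hd, ih true]
      cases t with
      | nil => simp [hd]
      | cons h u =>
        cases hcl : (h :: u).getLast? with
        | none => simp [List.getLast?_eq_none_iff] at hcl
        | some l => simp [hcl]
    · rw [if_neg hd, if_neg hd, ih false]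
      cases t with
      | nil =>
        simp only [List.getLast?_nil, Option.map_none, Option.getD_none,
          List.getLast?_singleton, Option.map_some, Option.getD_some]
        revert hd; cases PySem.Chars.isalpha d <;> simp
      | cons h u =>
        cases hcl : (h :: u).getLast? with
        | none => simp [List.getLast?_eq_none_iff] at hcl
        | some l => simp [hcl]

-- B's forward lookahead scan equals A's reverse/title/reverse per word
lemma lastUpWord_eq (w : List Char) : lastUpWord w = (pyTitle w.reverse).reverse := by
  induction w with
  | nil => simp [lastUpWord, pyTitle, pyTitleGo]
  | cons c t ih =>
    rw [List.reverse_cons, pyTitle, pyTitleGo_snoc, List.reverse_append, List.reverse_singleton]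
    cases t with
    | nil =>
      simp only [lastUpWord, List.reverse_nil, pyTitleGo, titleStep,
        List.getLast?_nil, Option.map_none, Option.getD_none]
      split_ifs <;> simp_all
    | cons d u =>
      rw [lastUpWord, ih, pyTitle]
      simp [List.getLast?_reverse, titleStep]

-- ===== VERDICT (by name: the statement is the Claim_ definition above) =====
theorem last_upper_spec : Claim_equal_last_upper := by
  intro text _
  unfold Spec_last_upper last_upper last_upper_alt
  simp only [PySem.List.foldl_append_singleton_eq_map, split0_eq_tokens,
    tokens_reverse, List.map_reverse, List.map_map, join_reverse,
    List.reverse_reverse, List.nil_append]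
  have h : lastUpWord = fun w => (pyTitleGo false w.reverse).reverse :=
    funext fun w => lastUpWord_eq w
  rw [h]
  simp [Function.comp_def, pyTitle]
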